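-- pv_equiv track=rewrite | github.com/zralvansga/my-py-game | marble.py | setLevel
-- ===== SOURCE A (Python) =====
-- LEBARPAPAN = 7
--
-- TINGGIPAPAN = 7
--
-- def setLevel(level):
--     # kosongkan marbles table
--     marbles = []
--
--     # isi dengan False
--     for i in range(LEBARPAPAN):
--         marbles.append([False] * TINGGIPAPAN)
--
--     # inisialisasi level
--     if level == 1:
--         marbles[int(LEBARPAPAN/2)-2][int(TINGGIPAPAN/2)] = True
--         marbles[int(LEBARPAPAN/2)-1][int(TINGGIPAPAN/2)] = True
--         marbles[int(LEBARPAPAN/2)+1][int(TINGGIPAPAN/2)] = True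
--     elif level == 2:
--         marbles[int(LEBARPAPAN/2)-1][int(TINGGIPAPAN/2)] = True
--         marbles[int(LEBARPAPAN/2)][int(TINGGIPAPAN/2)] = True
--         marbles[int(LEBARPAPAN/2)][int(TINGGIPAPAN/2)-1] = True
--         marbles[int(LEBARPAPAN/2)+1][int(TINGGIPAPAN/2)+1] = True
--     elif level == 3:
--         marbles[int(LEBARPAPAN/2)-2][int(TINGGIPAPAN/2)] = True
--         marbles[int(LEBARPAPAN/2)-1][int(TINGGIPAPAN/2)] = True
--         marbles[int(LEBARPAPAN/2)][int(TINGGIPAPAN/2)] = True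
--         marbles[int(LEBARPAPAN/2)+1][int(TINGGIPAPAN/2)] = True
--         marbles[int(LEBARPAPAN/2)+2][int(TINGGIPAPAN/2)] = True
--
--         marbles[int(LEBARPAPAN/2)-1][int(TINGGIPAPAN/2)-1] = True
--         marbles[int(LEBARPAPAN/2)][int(TINGGIPAPAN/2)-1] = True
--         marbles[int(LEBARPAPAN/2)+1][int(TINGGIPAPAN/2)-1] = True
--
--         marbles[int(LEBARPAPAN/2)][int(TINGGIPAPAN/2)-2] = True
--         #===========================================
--         # ========= tambah level disini ===========
--         #===========================================
--     else:
--         #default level 1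
--         marbles[int(LEBARPAPAN/2)-2][int(TINGGIPAPAN/2)] = True
--         marbles[int(LEBARPAPAN/2)-1][int(TINGGIPAPAN/2)] = True
--         marbles[int(LEBARPAPAN/2)+1][int(TINGGIPAPAN/2)] = True
--
--     # kembalikan nilai marbles table
--     return marbles
-- ===== SOURCE B (Python) =====
-- LEBARPAPAN = 7
--
-- TINGGIPAPAN = 7
--
--
-- def setLevel(level):
--     # Each cell is computed from a geometric predicate on (row, col):
--     # no mutation, no coordinate list -- the board is a pure function of (r, c).
--     def on(r, c):
--         if level == 2:
--             return (c == 3 and 2 <= r <= 3) or (r == 3 and c == 2) or (r == 4 and c == 4)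
--         elif level == 3:
--             # diamond of radius 2 around the centre, left half (c <= 3)
--             return c <= 3 and abs(r - 3) + abs(c - 3) <= 2
--         else:
--             # level 1 and the default: centre column, rows 1..4 except the centre
--             return c == 3 and 1 <= r <= 4 and r != 3
--     return [[on(r, c) for c in range(TINGGIPAPAN)] for r in range(LEBARPAPAN)]
-- ===== Notes on version B (the rewrite author's own statement) =====
-- stated objective: alternative
-- what changed: Replaces A's imperative board mutation (append rows, then branch-by-branch cell assignments) by a pure nested comprehension in which every cell is computed from a per-level geometric predicate on (row, col) -- the largest layout is the left half of a radius-2 diamond, the others are small boolean formulas; no mutation at all.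
import Mathlib
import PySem

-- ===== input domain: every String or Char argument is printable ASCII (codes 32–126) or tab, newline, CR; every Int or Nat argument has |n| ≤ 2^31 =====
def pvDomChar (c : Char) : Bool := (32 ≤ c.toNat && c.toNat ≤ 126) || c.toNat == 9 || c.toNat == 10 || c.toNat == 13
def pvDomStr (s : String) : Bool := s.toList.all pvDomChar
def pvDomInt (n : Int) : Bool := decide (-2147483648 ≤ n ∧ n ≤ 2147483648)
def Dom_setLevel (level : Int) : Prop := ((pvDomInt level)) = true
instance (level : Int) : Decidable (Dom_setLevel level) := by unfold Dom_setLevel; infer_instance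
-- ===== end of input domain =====

-- B replaces A's board mutation by a pure comprehension computing each cell from a
-- per-level geometric predicate on (row, col) (objective: alternative); same value everywhere.

-- ===== PORT A =====
-- marbles[r][c] = True  (r, c are literal in-range indices in A)
def pvSetCellA (m : List (List Bool)) (r c : Nat) : List (List Bool) :=
  m.modify r (fun row => row.set c true)

def setLevel (level : Int) : List (List Bool) :=
  -- for i in range(LEBARPAPAN): marbles.append([False] * TINGGIPAPAN)
  let marbles := (List.range 7).foldl (fun m _ => m ++ [List.replicate 7 false]) []
  if level = 1 then
    pvSetCellA (pvSetCellA (pvSetCellA marbles 1 3) 2 3) 4 3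
  else if level = 2 then
    pvSetCellA (pvSetCellA (pvSetCellA (pvSetCellA marbles 2 3) 3 3) 3 2) 4 4
  else if level = 3 then
    pvSetCellA (pvSetCellA (pvSetCellA (pvSetCellA (pvSetCellA
      (pvSetCellA (pvSetCellA (pvSetCellA (pvSetCellA marbles 1 3) 2 3) 3 3) 4 3) 5 3)
      2 2) 3 2) 4 2) 3 1
  else
    pvSetCellA (pvSetCellA (pvSetCellA marbles 1 3) 2 3) 4 3

-- ===== PORT B =====
-- the per-level cell predicate `on(r, c)` of Source B
def pvOn (level : Int) (r c : Nat) : Bool :=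
  if level = 2 then
    (c == 3 && 2 ≤ r && r ≤ 3) || (r == 3 && c == 2) || (r == 4 && c == 4)
  else if level = 3 then
    -- diamond of radius 2 around the centre, left half (c <= 3)
    c ≤ 3 && (((r : Int) - 3).natAbs + ((c : Int) - 3).natAbs ≤ 2)
  else
    c == 3 && 1 ≤ r && r ≤ 4 && r ≠ 3

def setLevel_alt (level : Int) : List (List Bool) :=
  (List.range 7).map (fun r => (List.range 7).map (fun c => pvOn level r c))

-- ===== PRECONDITION & SPEC =====
def Spec_setLevel (level : Int) (out : List (List Bool)) : Prop := out = setLevel_alt level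
instance (level : Int) (out : List (List Bool)) : Decidable (Spec_setLevel level out) := by unfold Spec_setLevel; infer_instance

-- ===== CLAIM (what is proved, stated in full; the proofs are below) =====
def Claim_equal_setLevel : Prop := ∀ (level : Int), Dom_setLevel level → Spec_setLevel level (setLevel level)

-- ===== LEMMAS AND PROOFS =====

-- ===== VERDICT (by name: the statement is the Claim_ definition above) =====
theorem setLevel_spec : Claim_equal_setLevel := by
  intro level _
  unfold Spec_setLevel
  by_cases h1 : level = 1
  · subst h1; decide
  by_cases h2 : level = 2
  · subst h2; decide
  by_cases h3 : level = 3
  · subst h3; decide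
  simp only [setLevel, setLevel_alt, pvOn, if_neg h1, if_neg h2, if_neg h3]
  decide
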